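-- pv_equiv track=rewrite | github.com/xjayleex/problem_solving | programmers/택배배달과수거하기.py | solution
-- ===== SOURCE A (Python) =====
-- from collections import deque
--
-- def solution(cap, n, deliveries, pickups):
--     answer = 0
--     l1 = [[i,e] for i, e in enumerate(deliveries) if e != 0]
--     l2 = [[i,e] for i, e in enumerate(pickups) if e != 0]
--     s1, s2 = deque(l1), deque(l2)
--     while s1 or s2 :
--         capacity = cap
--         d = 0
--         if s1 and s2:
--             d = s1[-1][0] if s1[-1][0] >= s2[-1][0] else s2[-1][0]
--             while s1 and capacity :
--                 if capacity >= s1[-1][1]: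
--                     capacity -= s1[-1][1]
--                     s1.pop()
--                 else:
--                     s1[-1][1] -= capacity
--                     capacity = 0
--             capacity = cap
--             while s2 and capacity :
--                 if capacity >= s2[-1][1]:
--                     capacity -= s2[-1][1]
--                     s2.pop()
--                 else:
--                     s2[-1][1] -= capacity
--                     capacity = 0
--
--         elif not s1:
--             d = s2[-1][0]
--             while s2 and capacity :
--                 if capacity >= s2[-1][1]:
--                     capacity -= s2[-1][1]
--                     s2.pop()
--                 else:
--                     s2[-1][1] -= capacity
--                     capacity = 0
--         else:
--             d = s1[-1][0]
--             while s1 and capacity :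
--                 if capacity >= s1[-1][1]:
--                     capacity -= s1[-1][1]
--                     s1.pop()
--                 else:
--                     s1[-1][1] -= capacity
--                     capacity = 0
--         answer += (d+1) * 2
--     return answer
-- ===== SOURCE B (Python) =====
-- def solution(cap, n, deliveries, pickups):
--     # Single reverse pass.  Per side we track (r, c): r = serve rounds begun so
--     # far for the houses seen, c = capacity left in the latest round; an item
--     # larger than c is absorbed by jumping whole rounds with ceiling division.
--     def feed(r, c, e):
--         if e == 0:
--             return r, c
--         if c == 0:
--             r, c = r + 1, cap
--         if e <= c:
--             return r, c - e
--         k = -(-(e - c) // cap)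
--         return r + k, k * cap - (e - c)
--
--     ans = 0
--     r1 = c1 = r2 = c2 = 0
--     for i in range(max(len(deliveries), len(pickups)) - 1, -1, -1):
--         r1, c1 = feed(r1, c1, deliveries[i] if i < len(deliveries) else 0)
--         r2, c2 = feed(r2, c2, pickups[i] if i < len(pickups) else 0)
--         ans += 2 * (r1 if r1 >= r2 else r2)
--     return ans
-- ===== Notes on version B (the rewrite author's own statement) =====
-- stated objective: faster
-- what changed: Replaces the deque simulation that replays one truck trip at a time (popping/decrementing stack tops per trip) with a single reverse pass over the houses that tracks per side the number of trips begun and the capacity left in the current trip, absorbing oversized loads in O(1) by ceiling-division round jumps.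
-- outside the precondition, e.g. on solution(-4, 1, [-5], []): A returns 2, B returns 2; on solution(-5, 2, [], [-8, -6]): A returns 4, B returns 4
import Mathlib
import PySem

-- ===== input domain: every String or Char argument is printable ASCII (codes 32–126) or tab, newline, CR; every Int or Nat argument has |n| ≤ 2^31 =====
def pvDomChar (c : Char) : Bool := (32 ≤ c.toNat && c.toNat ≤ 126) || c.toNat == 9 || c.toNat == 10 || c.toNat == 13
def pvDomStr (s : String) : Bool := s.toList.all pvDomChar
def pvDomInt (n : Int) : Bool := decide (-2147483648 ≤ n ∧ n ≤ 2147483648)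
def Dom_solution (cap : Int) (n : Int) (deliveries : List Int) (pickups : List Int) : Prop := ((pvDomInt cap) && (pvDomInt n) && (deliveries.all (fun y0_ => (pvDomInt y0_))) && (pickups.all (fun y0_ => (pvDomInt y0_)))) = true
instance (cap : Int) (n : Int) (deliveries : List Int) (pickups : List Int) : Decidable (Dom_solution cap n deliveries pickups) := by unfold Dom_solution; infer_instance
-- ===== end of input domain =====

-- B replaces A's trip-by-trip deque simulation with a single reverse pass that tracks,
-- per side, the number of trips begun and the capacity left in the current trip,
-- absorbing oversized loads in O(1) by ceiling-division round jumps (faster).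

-- ===== PORT A =====
-- A's deques are popped only from the right; they are encoded head-first (reversed),
-- so Python's s[-1] is the head and s.pop() drops the head.  Otherwise step for step.
def pvFilt (xs : List Int) : List (Int × Int) :=
  ((PySem.List.enumerate xs).filter (fun p => p.2 != 0)).reverse

-- the inner 'while s and capacity:' loop (textually identical in all three branches of A)
def pvServe (capacity : Int) : List (Int × Int) → List (Int × Int)
  | [] => []
  | (i, e) :: rest =>
    if capacity = 0 then (i, e) :: rest
    else if capacity ≥ e then pvServe (capacity - e) rest
    else (i, e - capacity) :: rest

-- the outer 'while s1 or s2:' loop; fueled, because Python diverges for cap ≤ 0 (outside Pre_)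
def pvLoop (cap : Int) : Nat → List (Int × Int) → List (Int × Int) → Int → Int
  | 0, _, _, answer => answer
  | fuel + 1, s1, s2, answer =>
    match s1, s2 with
    | [], [] => answer
    | (i, e1) :: t1, (j, e2) :: t2 =>
        pvLoop cap fuel (pvServe cap ((i, e1) :: t1)) (pvServe cap ((j, e2) :: t2))
          (answer + ((if i ≥ j then i else j) + 1) * 2)
    | [], (j, e2) :: t2 =>
        pvLoop cap fuel [] (pvServe cap ((j, e2) :: t2)) (answer + (j + 1) * 2)
    | (i, e1) :: t1, [] =>
        pvLoop cap fuel (pvServe cap ((i, e1) :: t1)) [] (answer + (i + 1) * 2)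

-- enough fuel on every input Pre_ admits (each outer trip finishes at least one round)
def pvFuel (s1 s2 : List (Int × Int)) : Nat :=
  (s1.map (fun p => p.2.natAbs + 1)).sum + (s2.map (fun p => p.2.natAbs + 1)).sum + 1

def solution (cap : Int) (n : Int) (deliveries : List Int) (pickups : List Int) : Int :=
  pvLoop cap (pvFuel (pvFilt deliveries) (pvFilt pickups)) (pvFilt deliveries) (pvFilt pickups) 0

-- ===== PORT B =====
-- Source B's feed(r, c, e): one house's load folded into (trips begun, capacity left)
def pvFeed (cap : Int) (r : Int) (c : Int) (e : Int) : Int × Int :=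
  if e = 0 then (r, c)
  else
    let rc := if c = 0 then (r + 1, cap) else (r, c)
    if e ≤ rc.2 then (rc.1, rc.2 - e)
    else
      let k := -(PySem.Int.floordiv (-(e - rc.2)) cap)
      (rc.1 + k, k * cap - (e - rc.2))

-- Source B's 'for i in range(m-1, -1, -1)' countdown, state (ans, r1, c1, r2, c2); k = i + 1
def pvBLoop (cap : Int) (ds ps : List Int) : Nat → Int → Int → Int → Int → Int → Int
  | 0, ans, _, _, _, _ => ans
  | k + 1, ans, r1, c1, r2, c2 =>
    let s1 := pvFeed cap r1 c1 (if (k : Int) < ds.length then ds.getD k 0 else 0)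
    let s2 := pvFeed cap r2 c2 (if (k : Int) < ps.length then ps.getD k 0 else 0)
    pvBLoop cap ds ps k (ans + 2 * (if s1.1 ≥ s2.1 then s1.1 else s2.1)) s1.1 s1.2 s2.1 s2.2

def solution_alt (cap : Int) (n : Int) (deliveries : List Int) (pickups : List Int) : Int :=
  pvBLoop cap deliveries pickups (max deliveries.length pickups.length) 0 0 0 0 0

-- ===== PRECONDITION & SPEC =====
-- Pre_ requires a positive capacity unless every load is zero: for cap ≤ 0 with a
-- nonzero load A's outer loop almost always diverges (and where it happens to return,
-- its value is an accident of negative-capacity comparisons no caller relies on).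
def Pre_solution (cap : Int) (n : Int) (deliveries : List Int) (pickups : List Int) : Prop :=
  1 ≤ cap ∨ ((∀ x ∈ deliveries, x = 0) ∧ (∀ x ∈ pickups, x = 0))
instance (cap : Int) (n : Int) (deliveries : List Int) (pickups : List Int) : Decidable (Pre_solution cap n deliveries pickups) := by unfold Pre_solution; infer_instance

def pvWitness_solution : Int × Int × List Int × List Int := (4, 2, [1, -2], [0, 3])

def Spec_solution (cap : Int) (n : Int) (deliveries : List Int) (pickups : List Int) (out : Int) : Prop := out = solution_alt cap n deliveries pickups
instance (cap : Int) (n : Int) (deliveries : List Int) (pickups : List Int) (out : Int) : Decidable (Spec_solution cap n deliveries pickups out) := by unfold Spec_solution; infer_instance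

-- ===== CLAIM (what is proved, stated in full; the proofs are below) =====
def Claim_equal_solution : Prop := ∀ (cap : Int) (n : Int) (deliveries : List Int) (pickups : List Int), Dom_solution cap n deliveries pickups → Pre_solution cap n deliveries pickups → Spec_solution cap n deliveries pickups (solution cap n deliveries pickups)

-- ===== LEMMAS AND PROOFS =====

-- ceiling division ⌈x/cap⌉ as B computes it
def pvCeil (cap x : Int) : Int := -(PySem.Int.floordiv (-x) cap)

lemma pvCeil_bounds (cap x : Int) (hc : 0 < cap) :
    (pvCeil cap x - 1) * cap < x ∧ x ≤ pvCeil cap x * cap :=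
  (PySem.Int.neg_floordiv_neg_eq_iff_of_pos hc).mp rfl

lemma pvCeil_shift (cap x k : Int) (hc : 0 < cap) :
    pvCeil cap (x - k * cap) = pvCeil cap x - k := by
  obtain ⟨h1, h2⟩ := pvCeil_bounds cap x hc
  exact (PySem.Int.neg_floordiv_neg_eq_iff_of_pos hc).mpr ⟨by nlinarith, by nlinarith⟩

lemma pvCeil_one (cap d : Int) (hc : 0 < cap) (h0 : 0 < d) (h1 : d ≤ cap) :
    pvCeil cap d = 1 := by
  exact (PySem.Int.neg_floordiv_neg_eq_iff_of_pos hc).mpr ⟨by nlinarith, by nlinarith⟩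

-- the per-stack round process, folded item by item (B's feed over a value list)
def pvFold (cap : Int) (σ : Int × Int) (q : List (Int × Int)) : Int × Int :=
  q.foldl (fun st p => pvFeed cap st.1 st.2 p.2) σ

-- items still at distance ≥ i+1 (stacks are sorted by strictly decreasing index)
def pvPre (s : List (Int × Int)) (i : Nat) : List (Int × Int) :=
  s.filter (fun p => decide ((i : Int) ≤ p.1))

-- number of serve rounds until every item with index ≥ i is gone
def pvN (cap : Int) (s : List (Int × Int)) (i : Nat) : Int :=
  (pvFold cap (0, 0) (pvPre s i)).1

def pvWf (s : List (Int × Int)) : Prop :=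
  s.Pairwise (fun p q => q.1 < p.1) ∧ ∀ p ∈ s, p.2 ≠ 0 ∧ 0 ≤ p.1
def pvTopB (s : List (Int × Int)) (M : Nat) : Prop := ∀ p ∈ s, p.1 < (M : Int)

lemma pvFeed_shift (cap r c e : Int) :
    pvFeed cap (r + 1) c e = ((pvFeed cap r c e).1 + 1, (pvFeed cap r c e).2) := by
  simp only [pvFeed]
  split_ifs <;> simp <;> ring

lemma pvFold_shift (cap : Int) : ∀ (q : List (Int × Int)) (r c : Int),
    pvFold cap (r + 1, c) q = ((pvFold cap (r, c) q).1 + 1, (pvFold cap (r, c) q).2) := by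
  intro q
  induction q with
  | nil => intro r c; rfl
  | cons p t ih =>
    intro r c
    simp only [pvFold, List.foldl_cons, pvFeed_shift]
    exact ih _ _

lemma pvFeed_invar (cap r c e : Int) (hcap : 1 ≤ cap) (hc : 0 ≤ c) :
    r ≤ (pvFeed cap r c e).1 ∧ 0 ≤ (pvFeed cap r c e).2 := by
  simp only [pvFeed]
  split_ifs with h0 hz hle hle'
  · omega
  · simp only
    omega
  · simp only
    rw [show -(PySem.Int.floordiv (-(e - cap)) cap) = pvCeil cap (e - cap) from rfl]
    have hd : 0 < e - cap := by simp at hle; omega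
    obtain ⟨hb1, hb2⟩ := pvCeil_bounds cap (e - cap) (by omega)
    have hk : 1 ≤ pvCeil cap (e - cap) := by nlinarith
    constructor
    · omega
    · nlinarith
  · simp only
    omega
  · simp only
    rw [show -(PySem.Int.floordiv (-(e - c)) cap) = pvCeil cap (e - c) from rfl]
    have hd : 0 < e - c := by simp at hle'; omega
    obtain ⟨hb1, hb2⟩ := pvCeil_bounds cap (e - c) (by omega)
    have hk : 1 ≤ pvCeil cap (e - c) := by nlinarith
    constructor
    · omega
    · nlinarith

lemma pvFold_invar (cap : Int) : ∀ (q : List (Int × Int)) (r c : Int), 1 ≤ cap → 0 ≤ c →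
    r ≤ (pvFold cap (r, c) q).1 ∧ 0 ≤ (pvFold cap (r, c) q).2 := by
  intro q
  induction q with
  | nil => intro r c _ hc; exact ⟨le_refl r, hc⟩
  | cons p t ih =>
    intro r c hcap hc
    simp only [pvFold, List.foldl_cons]
    obtain ⟨h1, h2⟩ := pvFeed_invar cap r c p.2 hcap hc
    obtain ⟨h3, h4⟩ := ih (pvFeed cap r c p.2).1 (pvFeed cap r c p.2).2 hcap h2
    exact ⟨le_trans h1 h3, h4⟩

lemma pvFeed_bound (cap r c e : Int) (hcap : 1 ≤ cap) (hc : 0 ≤ c) :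
    (pvFeed cap r c e).1 ≤ r + (e.natAbs : Int) + 1 := by
  simp only [pvFeed]
  split_ifs with h0 hz hle hle'
  · omega
  · simp only
    omega
  · simp only
    rw [show -(PySem.Int.floordiv (-(e - cap)) cap) = pvCeil cap (e - cap) from rfl]
    have hd : 0 < e - cap := by simp at hle; omega
    obtain ⟨hb1, hb2⟩ := pvCeil_bounds cap (e - cap) (by omega)
    have hk : pvCeil cap (e - cap) ≤ e - cap := by nlinarith
    omega
  · simp only
    omega
  · simp only
    rw [show -(PySem.Int.floordiv (-(e - c)) cap) = pvCeil cap (e - c) from rfl]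
    have hd : 0 < e - c := by simp at hle'; omega
    obtain ⟨hb1, hb2⟩ := pvCeil_bounds cap (e - c) (by omega)
    have hk : pvCeil cap (e - c) ≤ e - c := by nlinarith
    omega

lemma pvFold_bound (cap : Int) : ∀ (q : List (Int × Int)) (r c : Int), 1 ≤ cap → 0 ≤ c →
    (pvFold cap (r, c) q).1 ≤ r + ((q.map (fun p => (p.2.natAbs : Int) + 1)).sum) := by
  intro q
  induction q with
  | nil => intro r c _ _; simp [pvFold]
  | cons p t ih =>
    intro r c hcap hc
    simp only [pvFold, List.foldl_cons, List.map_cons, List.sum_cons]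
    obtain ⟨_, h2⟩ := pvFeed_invar cap r c p.2 hcap hc
    have h3 := ih (pvFeed cap r c p.2).1 (pvFeed cap r c p.2).2 hcap h2
    have h4 := pvFeed_bound cap r c p.2 hcap hc
    simp only [pvFold] at h3
    rw [Prod.mk.eta] at h3
    omega

lemma pvFeed_pop (cap r c e : Int) (hc0 : c ≠ 0) (he : e ≠ 0) (hle : e ≤ c) :
    pvFeed cap r c e = (r, c - e) := by
  simp only [pvFeed, if_neg he, if_neg hc0]
  rw [if_pos hle]

lemma pvFeed_big (cap r c e : Int) (hc0 : c ≠ 0) (he : e ≠ 0) (hgt : ¬ e ≤ c) :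
    pvFeed cap r c e = (r + pvCeil cap (e - c), pvCeil cap (e - c) * cap - (e - c)) := by
  simp only [pvFeed, if_neg he, if_neg hc0]
  rw [if_neg hgt]
  rfl

lemma pvFeed_zero_pos (cap r d : Int) (hcap : 1 ≤ cap) (hd : 0 < d) :
    pvFeed cap r 0 d = (r + pvCeil cap d, pvCeil cap d * cap - d) := by
  have hne : ¬ d = 0 := by omega
  simp only [pvFeed, if_neg hne, if_true]
  by_cases hle : d ≤ cap
  · rw [if_pos hle, pvCeil_one cap d (by omega) hd hle]
    simp
  · rw [if_neg hle]
    have h1 : pvCeil cap (d - cap) = pvCeil cap d - 1 := by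
      simpa using pvCeil_shift cap d 1 (by omega)
    rw [show -(PySem.Int.floordiv (-(d - cap)) cap) = pvCeil cap (d - cap) from rfl, h1]
    simp only [Prod.mk.injEq]
    refine ⟨by omega, by ring⟩

lemma pvFeed_zero_shift (cap e : Int) (hcap : 1 ≤ cap) (he : e ≠ 0) :
    pvFeed cap 0 0 e = ((pvFeed cap 0 cap e).1 + 1, (pvFeed cap 0 cap e).2) := by
  have hc0 : (cap : Int) ≠ 0 := by omega
  simp only [pvFeed, if_neg he, if_true, if_neg hc0]
  split_ifs <;> simp only [Prod.mk.injEq] <;> refine ⟨by omega, by trivial⟩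

lemma pvServe_mem (c : Int) (s : List (Int × Int)) (p : Prod Int Int) (hp : p ∈ pvServe c s) :
    ∃ q ∈ s, p.1 = q.1 := by
  induction s generalizing c with
  | nil => simp [pvServe] at hp
  | cons a t ih =>
    obtain ⟨j, e⟩ := a
    simp only [pvServe] at hp
    split_ifs at hp with h1 h2
    · exact ⟨p, hp, rfl⟩
    · obtain ⟨q, hq, he⟩ := ih (c - e) hp
      exact ⟨q, List.mem_cons_of_mem _ hq, he⟩
    · rcases List.mem_cons.mp hp with h | h
      · exact ⟨(j, e), List.mem_cons_self, by rw [h]⟩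
      · exact ⟨p, List.mem_cons_of_mem _ h, rfl⟩

lemma pvServe_wf (c : Int) (s : List (Int × Int)) (hc : 0 ≤ c) (hw : pvWf s) :
    pvWf (pvServe c s) := by
  induction s generalizing c with
  | nil => simpa [pvServe] using hw
  | cons a t ih =>
    obtain ⟨j, e⟩ := a
    obtain ⟨hpw, hent⟩ := hw
    rw [List.pairwise_cons] at hpw
    simp only [pvServe]
    split_ifs with h1 h2
    · exact ⟨List.pairwise_cons.mpr hpw, hent⟩
    · exact ih (c - e) (by omega) ⟨hpw.2, fun p hp => hent p (List.mem_cons_of_mem _ hp)⟩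
    · constructor
      · exact List.pairwise_cons.mpr ⟨fun q hq => hpw.1 q hq, hpw.2⟩
      · intro p hp
        rcases List.mem_cons.mp hp with h | h
        · have := hent (j, e) List.mem_cons_self
          subst h; constructor
          · simp only; omega
          · exact this.2
        · exact hent p (List.mem_cons_of_mem _ h)


-- serving capacity c first, then folding the remainder from an exhausted round,
-- is the same as folding with c still available
lemma pvServe_fold (cap : Int) (hcap : 1 ≤ cap) :
    ∀ (q : List (Int × Int)) (r c : Int), 0 ≤ c → (∀ p ∈ q, p.2 ≠ 0) →
      (pvFold cap (r, c) q).1 = (pvFold cap (r, 0) (pvServe c q)).1 := by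
  intro q
  induction q with
  | nil => intro r c _ _; simp [pvServe, pvFold]
  | cons p t ih =>
    intro r c hc hne
    obtain ⟨j, e⟩ := p
    have he : e ≠ 0 := hne (j, e) List.mem_cons_self
    have hnt : ∀ p ∈ t, p.2 ≠ 0 := fun p hp => hne p (List.mem_cons_of_mem _ hp)
    by_cases hc0 : c = 0
    · subst hc0
      simp [pvServe]
    · simp only [pvServe, if_neg hc0]
      split_ifs with hge
      · -- pop: e ≤ c
        rw [← ih r (c - e) (by omega) hnt]
        simp only [pvFold, List.foldl_cons]
        rw [pvFeed_pop cap r c e hc0 he (by omega)]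
      · -- shortfall: e > c > 0, the item is reduced by c
        simp only [pvFold, List.foldl_cons]
        have hd : 0 < e - c := by omega
        rw [pvFeed_big cap r c e hc0 he (by omega),
          pvFeed_zero_pos cap r (e - c) hcap hd]

-- restricting to indices ≥ i commutes with one serve round (stacks sorted descending)
lemma pvPre_serve (c : Int) (i : Nat) :
    ∀ s : List (Int × Int), s.Pairwise (fun p q => q.1 < p.1) →
      pvPre (pvServe c s) i = pvServe c (pvPre s i) := by
  intro s
  induction s generalizing c with
  | nil => intro _; rfl
  | cons p t ih =>
    intro hpw
    obtain ⟨j, e⟩ := p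
    rw [List.pairwise_cons] at hpw
    by_cases hij : (i : Int) ≤ j
    · have hcons : pvPre ((j, e) :: t) i = (j, e) :: pvPre t i := by
        simp [pvPre, hij]
      rw [hcons]
      simp only [pvServe]
      split_ifs with h1 h2
      · rw [hcons]
      · exact ih (c - e) hpw.2
      · simp [pvPre, hij]
    · -- every index of the stack is < i, on both sides
      have hall : ∀ p ∈ (j, e) :: t, p.1 < (i : Int) := by
        intro p hp
        rcases List.mem_cons.mp hp with h | h
        · rw [h]; omega
        · have := hpw.1 p h; omega
      have h1 : pvPre ((j, e) :: t) i = [] := by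
        rw [pvPre, List.filter_eq_nil_iff]
        intro p hp
        simpa using not_le.mpr (hall p hp)
      have h2 : pvPre (pvServe c ((j, e) :: t)) i = [] := by
        rw [pvPre, List.filter_eq_nil_iff]
        intro p hp
        obtain ⟨q, hq, heq⟩ := pvServe_mem c _ p hp
        rw [heq]
        simpa using not_le.mpr (hall q hq)
      rw [h1, h2]
      rfl

-- folding a nonempty all-nonzero list from (0,0) begins round 1 immediately
lemma pvFold_head (cap : Int) (hcap : 1 ≤ cap) (j e : Int) (t : List (Int × Int))
    (he : e ≠ 0) :
    (pvFold cap (0, 0) ((j, e) :: t)).1 = (pvFold cap (0, cap) ((j, e) :: t)).1 + 1 := by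
  have hfeed := pvFeed_zero_shift cap e hcap he
  simp only [pvFold, List.foldl_cons] at *
  rw [hfeed]
  have := pvFold_shift cap t (pvFeed cap 0 cap e).1 (pvFeed cap 0 cap e).2
  simp only [pvFold] at this
  rw [this]

lemma pvN_nonneg (cap : Int) (s : List (Int × Int)) (i : Nat) (hcap : 1 ≤ cap) :
    0 ≤ pvN cap s i :=
  (pvFold_invar cap (pvPre s i) 0 0 hcap (le_refl 0)).1

lemma pvN_eq_zero (cap : Int) (s : List (Int × Int)) (i : Nat)
    (h : ∀ p ∈ s, p.1 < (i : Int)) : pvN cap s i = 0 := by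
  have hnil : pvPre s i = [] := by
    rw [pvPre, List.filter_eq_nil_iff]
    intro p hp
    simpa using not_le.mpr (h p hp)
  rw [pvN, hnil]
  rfl

lemma pvN_top_zero (cap j e : Int) (t : List (Int × Int)) (i : Nat)
    (hw : pvWf ((j, e) :: t)) (h : j < (i : Int)) : pvN cap ((j, e) :: t) i = 0 := by
  apply pvN_eq_zero
  intro p hp
  rcases List.mem_cons.mp hp with h1 | h1
  · rw [h1]; exact h
  · have := (List.pairwise_cons.mp hw.1).1 p h1
    omega

lemma pvN_head_ge (cap j e : Int) (t : List (Int × Int)) (i : Nat) (hcap : 1 ≤ cap)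
    (hw : pvWf ((j, e) :: t)) (h : (i : Int) ≤ j) : 1 ≤ pvN cap ((j, e) :: t) i := by
  have hcons : pvPre ((j, e) :: t) i = (j, e) :: pvPre t i := by
    simp [pvPre, h]
  have he : e ≠ 0 := (hw.2 (j, e) List.mem_cons_self).1
  rw [pvN, hcons, pvFold_head cap hcap j e _ he]
  have := (pvFold_invar cap ((j, e) :: pvPre t i) 0 cap hcap (by omega)).1
  omega

-- one serve round lowers every pvN i by exactly 1, clamped at 0
lemma pvN_serve (cap : Int) (s : List (Int × Int)) (i : Nat) (hcap : 1 ≤ cap)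
    (hw : pvWf s) : pvN cap (pvServe cap s) i = max (pvN cap s i - 1) 0 := by
  have hq : ∀ p ∈ pvPre s i, p.2 ≠ 0 := by
    intro p hp
    exact (hw.2 p (List.mem_of_mem_filter hp)).1
  have hF : pvN cap (pvServe cap s) i = (pvFold cap (0, cap) (pvPre s i)).1 := by
    rw [pvN, pvPre_serve cap i s hw.1, ← pvServe_fold cap hcap _ 0 cap (by omega) hq]
  match hpre : pvPre s i with
  | [] =>
    have h0 : pvN cap s i = 0 := by rw [pvN, hpre]; rfl
    rw [hF, hpre, h0]
    rfl
  | (j, e) :: t =>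
    have he : e ≠ 0 := hq (j, e) (by rw [hpre]; exact List.mem_cons_self)
    have hhead : pvN cap s i = (pvFold cap (0, cap) ((j, e) :: t)).1 + 1 := by
      rw [pvN, hpre, pvFold_head cap hcap j e t he]
    have hnn := (pvFold_invar cap ((j, e) :: t) 0 cap hcap (by omega)).1
    rw [hF, hpre, hhead]
    omega

-- indicator sum
lemma pvSumInd (M : Nat) (d : Int) (h0 : 0 ≤ d) (hM : d < (M : Int)) :
    (∑ i ∈ Finset.range M, (if (i : Int) ≤ d then (1 : Int) else 0)) = d + 1 := by
  induction M with
  | zero => simp at hM; omega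
  | succ M ih =>
    rw [Finset.sum_range_succ]
    by_cases hd : d < (M : Int)
    · rw [ih hd, if_neg (by omega)]
      omega
    · have hdM : d = (M : Int) := by push_cast at hM; omega
      have hone : ∀ i ∈ Finset.range M, (if (i : Int) ≤ d then (1 : Int) else 0) = 1 := by
        intro i hi
        have := Finset.mem_range.mp hi
        rw [if_pos (by push_cast; omega)]
      rw [Finset.sum_congr rfl hone, Finset.sum_const, if_pos (by omega)]
      simp
      omega

-- the farthest remaining house, as the three branches of A compute it
def pvDtop : List (Int × Int) → List (Int × Int) → Int
  | [], [] => 0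
  | [], (j, _) :: _ => j
  | (i, _) :: _, [] => i
  | (i, _) :: _, (j, _) :: _ => if i ≥ j then i else j

lemma pvLoop_succ (cap : Int) (fuel : Nat) (s1 s2 : List (Int × Int)) (ans : Int)
    (hne : ¬(s1 = [] ∧ s2 = [])) :
    pvLoop cap (fuel + 1) s1 s2 ans
      = pvLoop cap fuel (pvServe cap s1) (pvServe cap s2) (ans + (pvDtop s1 s2 + 1) * 2) := by
  match s1, s2 with
  | [], [] => exact absurd ⟨rfl, rfl⟩ hne
  | [], (j, e2) :: t2 => simp [pvLoop, pvDtop, pvServe]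
  | (i, e1) :: t1, [] => simp [pvLoop, pvDtop, pvServe]
  | (i, e1) :: t1, (j, e2) :: t2 => simp [pvLoop, pvDtop]

lemma pvDtop_spec (cap : Int) (s1 s2 : List (Int × Int)) (M : Nat) (hcap : 1 ≤ cap)
    (hw1 : pvWf s1) (hw2 : pvWf s2) (htb1 : pvTopB s1 M) (htb2 : pvTopB s2 M)
    (hne : ¬(s1 = [] ∧ s2 = [])) :
    0 ≤ pvDtop s1 s2 ∧ pvDtop s1 s2 < (M : Int) ∧
      (∀ i : Nat, (i : Int) ≤ pvDtop s1 s2 → 1 ≤ max (pvN cap s1 i) (pvN cap s2 i)) ∧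
      (∀ i : Nat, pvDtop s1 s2 < (i : Int) → pvN cap s1 i = 0 ∧ pvN cap s2 i = 0) := by
  match s1, s2 with
  | [], [] => exact absurd ⟨rfl, rfl⟩ hne
  | [], (j, e2) :: t2 =>
    have hj0 : 0 ≤ j := (hw2.2 (j, e2) List.mem_cons_self).2
    have hjM : j < (M : Int) := htb2 (j, e2) List.mem_cons_self
    refine ⟨hj0, hjM, fun i hi => ?_, fun i hi => ?_⟩
    · have := pvN_head_ge cap j e2 t2 i hcap hw2 (by simpa [pvDtop] using hi)
      omega
    · exact ⟨pvN_eq_zero cap [] i (by simp), pvN_top_zero cap j e2 t2 i hw2 (by simpa [pvDtop] using hi)⟩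
  | (i0, e1) :: t1, [] =>
    have hj0 : 0 ≤ i0 := (hw1.2 (i0, e1) List.mem_cons_self).2
    have hjM : i0 < (M : Int) := htb1 (i0, e1) List.mem_cons_self
    refine ⟨hj0, hjM, fun i hi => ?_, fun i hi => ?_⟩
    · have := pvN_head_ge cap i0 e1 t1 i hcap hw1 (by simpa [pvDtop] using hi)
      omega
    · exact ⟨pvN_top_zero cap i0 e1 t1 i hw1 (by simpa [pvDtop] using hi), pvN_eq_zero cap [] i (by simp)⟩
  | (i0, e1) :: t1, (j, e2) :: t2 =>
    have hi00 : 0 ≤ i0 := (hw1.2 (i0, e1) List.mem_cons_self).2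
    have hi0M : i0 < (M : Int) := htb1 (i0, e1) List.mem_cons_self
    have hjM : j < (M : Int) := htb2 (j, e2) List.mem_cons_self
    have hd : pvDtop ((i0, e1) :: t1) ((j, e2) :: t2) = if i0 ≥ j then i0 else j := rfl
    refine ⟨by rw [hd]; omega, by rw [hd]; omega, fun i hi => ?_, fun i hi => ?_⟩
    · rw [hd] at hi
      by_cases hc : (i : Int) ≤ i0
      · have := pvN_head_ge cap i0 e1 t1 i hcap hw1 hc
        omega
      · have hcj : (i : Int) ≤ j := by split_ifs at hi <;> omega
        have := pvN_head_ge cap j e2 t2 i hcap hw2 hcj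
        omega
    · rw [hd] at hi
      have h1 : i0 < (i : Int) := by split_ifs at hi <;> omega
      have h2 : j < (i : Int) := by split_ifs at hi <;> omega
      exact ⟨pvN_top_zero cap i0 e1 t1 i hw1 h1, pvN_top_zero cap j e2 t2 i hw2 h2⟩

-- one outer trip lowers every pvN i by 1 clamped at 0, so the sum drops by d+1
lemma pvStep (cap : Int) (hcap : 1 ≤ cap) (s1 s2 : List (Int × Int)) (M : Nat)
    (hw1 : pvWf s1) (hw2 : pvWf s2) (htb1 : pvTopB s1 M) (htb2 : pvTopB s2 M)
    (hne : ¬(s1 = [] ∧ s2 = [])) :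
    ∑ i ∈ Finset.range M, max (pvN cap (pvServe cap s1) i) (pvN cap (pvServe cap s2) i)
      = (∑ i ∈ Finset.range M, max (pvN cap s1 i) (pvN cap s2 i)) - (pvDtop s1 s2 + 1) := by
  obtain ⟨hd0, hdM, hdle, hdgt⟩ := pvDtop_spec cap s1 s2 M hcap hw1 hw2 htb1 htb2 hne
  have hterm : ∀ i ∈ Finset.range M,
      max (pvN cap (pvServe cap s1) i) (pvN cap (pvServe cap s2) i)
        = max (pvN cap s1 i) (pvN cap s2 i) - (if (i : Int) ≤ pvDtop s1 s2 then (1 : Int) else 0) := by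
    intro i _
    have e1 := pvN_serve cap s1 i hcap hw1
    have e2 := pvN_serve cap s2 i hcap hw2
    have n1 := pvN_nonneg cap s1 i hcap
    have n2 := pvN_nonneg cap s2 i hcap
    by_cases hc : (i : Int) ≤ pvDtop s1 s2
    · have h1 := hdle i hc
      rw [if_pos hc, e1, e2]
      omega
    · obtain ⟨hz1, hz2⟩ := hdgt i (by omega)
      rw [if_neg hc, e1, e2, hz1, hz2]
      omega
  rw [Finset.sum_congr rfl hterm, Finset.sum_sub_distrib, pvSumInd M _ hd0 hdM]

-- A's outer loop computes 2 * Σ_i max(pvN s1 i, pvN s2 i)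
lemma pvLoop_eq (cap : Int) (hcap : 1 ≤ cap) :
    ∀ (fuel : Nat) (s1 s2 : List (Int × Int)) (ans : Int) (M : Nat),
      pvWf s1 → pvWf s2 → pvTopB s1 M → pvTopB s2 M →
      pvN cap s1 0 + pvN cap s2 0 < (fuel : Int) →
      pvLoop cap fuel s1 s2 ans
        = ans + 2 * ∑ i ∈ Finset.range M, max (pvN cap s1 i) (pvN cap s2 i) := by
  intro fuel
  induction fuel with
  | zero =>
    intro s1 s2 ans M hw1 hw2 htb1 htb2 hf
    have h1 := pvN_nonneg cap s1 0 hcap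
    have h2 := pvN_nonneg cap s2 0 hcap
    simp at hf
    omega
  | succ fuel ih =>
    intro s1 s2 ans M hw1 hw2 htb1 htb2 hf
    by_cases hne : s1 = [] ∧ s2 = []
    · obtain ⟨rfl, rfl⟩ := hne
      have hz : (∑ i ∈ Finset.range M,
          max (pvN cap ([] : List (Int × Int)) i) (pvN cap ([] : List (Int × Int)) i)) = 0 := by
        apply Finset.sum_eq_zero
        intro i _
        rw [pvN_eq_zero cap [] i (by simp)]
        simp
      simp only [pvLoop]
      rw [hz]
      ring
    · obtain ⟨hd0, hdM, hdle, hdgt⟩ := pvDtop_spec cap s1 s2 M hcap hw1 hw2 htb1 htb2 hne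
      have e1 := pvN_serve cap s1 0 hcap hw1
      have e2 := pvN_serve cap s2 0 hcap hw2
      have n1 := pvN_nonneg cap s1 0 hcap
      have n2 := pvN_nonneg cap s2 0 hcap
      have hpos : 1 ≤ max (pvN cap s1 0) (pvN cap s2 0) := hdle 0 (by push_cast; omega)
      have hfuel' : pvN cap (pvServe cap s1) 0 + pvN cap (pvServe cap s2) 0 < (fuel : Int) := by
        push_cast at hf ⊢
        omega
      have htb1' : pvTopB (pvServe cap s1) M := by
        intro p hp
        obtain ⟨q, hq, he⟩ := pvServe_mem cap s1 p hp
        rw [he]; exact htb1 q hq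
      have htb2' : pvTopB (pvServe cap s2) M := by
        intro p hp
        obtain ⟨q, hq, he⟩ := pvServe_mem cap s2 p hp
        rw [he]; exact htb2 q hq
      rw [pvLoop_succ cap fuel s1 s2 ans hne,
        ih (pvServe cap s1) (pvServe cap s2) _ M
          (pvServe_wf cap s1 (by omega) hw1) (pvServe_wf cap s2 (by omega) hw2)
          htb1' htb2' hfuel',
        pvStep cap hcap s1 s2 M hw1 hw2 htb1 htb2 hne]
      ring

-- ===== bridge: initial stacks ↔ arrays =====
lemma pvFilt_mem (xs : List Int) (p : Int × Int) (hp : p ∈ pvFilt xs) :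
    ∃ k : Nat, k < xs.length ∧ p = ((k : Int), xs.getD k 0) ∧ xs.getD k 0 ≠ 0 := by
  rw [pvFilt, List.mem_reverse, List.mem_filter] at hp
  obtain ⟨hmem, hne⟩ := hp
  obtain ⟨k, hk, rfl⟩ := (PySem.List.mem_enumerate_iff _ _ _).mp hmem
  refine ⟨k, hk, ?_, ?_⟩
  · simp [List.getD, List.getElem?_eq_getElem hk]
  · simpa [List.getD, List.getElem?_eq_getElem hk] using hne

lemma pvFilt_wf (xs : List Int) : pvWf (pvFilt xs) := by
  constructor
  · rw [pvFilt, List.pairwise_reverse]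
    exact (PySem.List.pairwise_lt_enumerate xs 0).sublist List.filter_sublist
  · intro p hp
    obtain ⟨k, hk, rfl, hne⟩ := pvFilt_mem xs p hp
    constructor
    · simpa using hne
    · simp only; omega

lemma pvFilt_topB (xs : List Int) (M : Nat) (h : xs.length ≤ M) : pvTopB (pvFilt xs) M := by
  intro p hp
  obtain ⟨k, hk, rfl, _⟩ := pvFilt_mem xs p hp
  simp only
  omega

-- cutting an enumerated list at index i is dropping i items
lemma pvEnum_cut (i : Nat) : ∀ (xs : List Int) (s : Int),
    (PySem.List.enumerate xs s).filter (fun p => decide (s + (i : Int) ≤ p.1))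
      = PySem.List.enumerate (xs.drop i) (s + (i : Int)) := by
  induction i with
  | zero =>
    intro xs s
    rw [List.filter_eq_self.mpr]
    · simp
    · intro p hp
      obtain ⟨k, hk, rfl⟩ := (PySem.List.mem_enumerate_iff _ _ _).mp hp
      simp only [decide_eq_true_eq]
      push_cast
      omega
  | succ i ih =>
    intro xs s
    match xs with
    | [] => simp [PySem.List.enumerate_nil]
    | x :: t =>
      rw [PySem.List.enumerate_cons, List.filter_cons]
      rw [if_neg (by simp only [decide_eq_true_eq]; push_cast; omega)]
      have := ih t (s + 1)
      rw [show (s + 1) + (i : Int) = s + ((i : Nat) + 1 : Nat) by push_cast; ring] at this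
      rw [show (fun p : Int × Int => decide (s + ((i : Nat) + 1 : Nat) ≤ p.1))
            = (fun p : Int × Int => decide ((s + 1) + (i : Int) ≤ p.1)) by
          funext p; congr 1; push_cast; ring_nf] at this ⊢
      rw [this]
      rfl

-- the values of the stack items at distance ≥ i+1, in served (descending) order
lemma pvPre_vals (xs : List Int) (i : Nat) :
    (pvPre (pvFilt xs) i).map (fun p => p.2) = ((xs.drop i).filter (fun e => e != 0)).reverse := by
  rw [pvPre, pvFilt, List.filter_reverse, List.filter_comm, List.map_reverse]
  congr 1
  have hcut := pvEnum_cut i xs 0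
  rw [zero_add] at hcut
  rw [show (fun p : Int × Int => decide ((i : Nat) ≤ p.1)) = (fun p : Int × Int => decide (((i : Nat) : Int) ≤ p.1)) by rfl]
  rw [hcut]
  rw [show (fun p : Int × Int => p.2 != 0) = ((fun e : Int => e != 0) ∘ (fun p : Int × Int => p.2)) from rfl]
  rw [← List.filter_map]
  rw [PySem.List.map_snd_enumerate]

lemma pvFilt_nil (xs : List Int) (h : ∀ x ∈ xs, x = 0) : pvFilt xs = [] := by
  rw [pvFilt, List.reverse_eq_nil_iff, List.filter_eq_nil_iff]
  intro p hp
  obtain ⟨k, hk, rfl⟩ := (PySem.List.mem_enumerate_iff _ _ _).mp hp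
  have := h xs[k] (List.getElem_mem hk)
  simp [this]

-- ===== B-side =====
-- rounds needed looking only at houses i, i+1, …, computed from the arrays
def pvSt (cap : Int) (xs : List Int) (i : Nat) : Int × Int :=
  (((xs.drop i).filter (fun e => e != 0)).reverse).foldl (fun st e => pvFeed cap st.1 st.2 e) (0, 0)

lemma pvSt_eq_fold (cap : Int) (xs : List Int) (i : Nat) :
    pvSt cap xs i = pvFold cap (0, 0) (pvPre (pvFilt xs) i) := by
  rw [pvSt, ← pvPre_vals xs i, pvFold, List.foldl_map]

lemma pvSt_step (cap : Int) (xs : List Int) (k : Nat) :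
    pvSt cap xs k
      = pvFeed cap (pvSt cap xs (k + 1)).1 (pvSt cap xs (k + 1)).2
          (if (k : Int) < xs.length then xs.getD k 0 else 0) := by
  by_cases hk : k < xs.length
  · have hd : xs.drop k = xs[k] :: xs.drop (k + 1) := List.drop_eq_getElem_cons hk
    have hg : xs.getD k 0 = xs[k] := by simp [List.getD, List.getElem?_eq_getElem hk]
    rw [if_pos (by push_cast; omega), hg]
    by_cases hz : xs[k] = 0
    · have : (xs.drop k).filter (fun e => e != 0) = (xs.drop (k + 1)).filter (fun e => e != 0) := by
        rw [hd, List.filter_cons, if_neg (by simp [hz])]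
      rw [pvSt, this, hz]
      simp only [pvFeed, if_pos (rfl : (0:Int) = 0)]
      rfl
    · have : (xs.drop k).filter (fun e => e != 0)
          = xs[k] :: (xs.drop (k + 1)).filter (fun e => e != 0) := by
        rw [hd, List.filter_cons, if_pos (by simp [hz])]
      rw [pvSt, this, List.reverse_cons, List.foldl_append]
      rfl
  · have h1 : xs.drop k = [] := List.drop_eq_nil_of_le (by omega)
    have h2 : xs.drop (k + 1) = [] := List.drop_eq_nil_of_le (by omega)
    rw [if_neg (by push_cast; omega), pvSt, pvSt, h1, h2]
    simp [pvFeed]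

lemma pvBLoop_eq (cap : Int) (ds ps : List Int) :
    ∀ (k : Nat) (ans : Int),
      pvBLoop cap ds ps k ans (pvSt cap ds k).1 (pvSt cap ds k).2
          (pvSt cap ps k).1 (pvSt cap ps k).2
        = ans + ∑ i ∈ Finset.range k, 2 * max (pvSt cap ds i).1 (pvSt cap ps i).1 := by
  intro k
  induction k with
  | zero =>
    intro ans
    simp [pvBLoop]
  | succ k ih =>
    intro ans
    simp only [pvBLoop]
    rw [← pvSt_step cap ds k, ← pvSt_step cap ps k, ih]
    rw [Finset.sum_range_succ]
    have : (if (pvSt cap ds k).1 ≥ (pvSt cap ps k).1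
        then (pvSt cap ds k).1 else (pvSt cap ps k).1)
        = max (pvSt cap ds k).1 (pvSt cap ps k).1 := by
      split_ifs <;> omega
    rw [this]
    ring

lemma pvBLoop_zeros (cap : Int) (ds ps : List Int)
    (hd : ∀ x ∈ ds, x = 0) (hp : ∀ x ∈ ps, x = 0) :
    ∀ k : Nat, pvBLoop cap ds ps k 0 0 0 0 0 = 0 := by
  intro k
  induction k with
  | zero => simp [pvBLoop]
  | succ k ih =>
    have h1 : (if (k : Int) < ds.length then ds.getD k 0 else 0) = 0 := by
      split_ifs with hlt
      · have hk : k < ds.length := by exact_mod_cast hlt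
        have he : ds.getD k 0 = ds[k] := by simp [List.getD, List.getElem?_eq_getElem hk]
        rw [he]
        exact hd _ (List.getElem_mem hk)
      · rfl
    have h2 : (if (k : Int) < ps.length then ps.getD k 0 else 0) = 0 := by
      split_ifs with hlt
      · have hk : k < ps.length := by exact_mod_cast hlt
        have he : ps.getD k 0 = ps[k] := by simp [List.getD, List.getElem?_eq_getElem hk]
        rw [he]
        exact hp _ (List.getElem_mem hk)
      · rfl
    simp only [pvBLoop, h1, h2]
    simpa [pvFeed] using ih

-- ===== VERDICT (by name: the statement is the Claim_ definition above) =====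
theorem solution_spec : Claim_equal_solution := by
  intro cap n ds ps _ hpre
  unfold Spec_solution
  rcases hpre with hcap | ⟨hzd, hzp⟩
  · -- positive capacity: both sides equal 2 * Σ_i max(N1 i, N2 i)
    have hw1 := pvFilt_wf ds
    have hw2 := pvFilt_wf ps
    have htb1 := pvFilt_topB ds (max ds.length ps.length) (le_max_left _ _)
    have htb2 := pvFilt_topB ps (max ds.length ps.length) (le_max_right _ _)
    have hpre0 : ∀ xs : List Int, pvPre (pvFilt xs) 0 = pvFilt xs := by
      intro xs
      rw [pvPre, List.filter_eq_self.mpr]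
      intro p hp
      obtain ⟨k, hk, rfl, _⟩ := pvFilt_mem xs p hp
      simp
    have hbound : ∀ xs : List Int, pvN cap (pvFilt xs) 0
        ≤ (((pvFilt xs).map (fun p => (p.2.natAbs : Int) + 1)).sum) := by
      intro xs
      have := pvFold_bound cap (pvPre (pvFilt xs) 0) 0 0 hcap (le_refl 0)
      simpa [pvN, hpre0 xs] using this
    have hfuel : pvN cap (pvFilt ds) 0 + pvN cap (pvFilt ps) 0
        < ((pvFuel (pvFilt ds) (pvFilt ps) : Nat) : Int) := by
      have h1 := hbound ds
      have h2 := hbound ps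
      simp only [pvFuel]
      push_cast [List.map_map, Function.comp_def] at h1 h2 ⊢
      omega
    have hA : solution cap n ds ps
        = 0 + 2 * ∑ i ∈ Finset.range (max ds.length ps.length),
            max (pvN cap (pvFilt ds) i) (pvN cap (pvFilt ps) i) :=
      pvLoop_eq cap hcap _ _ _ _ _ hw1 hw2 htb1 htb2 hfuel
    have hstD : pvSt cap ds (max ds.length ps.length) = (0, 0) := by
      rw [pvSt, List.drop_eq_nil_of_le (le_max_left _ _)]
      rfl
    have hstP : pvSt cap ps (max ds.length ps.length) = (0, 0) := by
      rw [pvSt, List.drop_eq_nil_of_le (le_max_right _ _)]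
      rfl
    have hB := pvBLoop_eq cap ds ps (max ds.length ps.length) 0
    rw [hstD, hstP] at hB
    have hNN : ∀ i ∈ Finset.range (max ds.length ps.length),
        2 * max (pvSt cap ds i).1 (pvSt cap ps i).1
          = 2 * max (pvN cap (pvFilt ds) i) (pvN cap (pvFilt ps) i) := by
      intro i _
      rw [pvSt_eq_fold, pvSt_eq_fold]
      rfl
    rw [hA]
    unfold solution_alt
    rw [hB, Finset.sum_congr rfl hNN, zero_add, zero_add, Finset.mul_sum]
  · -- cap may be ≤ 0, but every load is zero: both sides return 0
    have h1 : pvFilt ds = [] := pvFilt_nil ds hzd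
    have h2 : pvFilt ps = [] := pvFilt_nil ps hzp
    have hA : solution cap n ds ps = 0 := by
      simp [solution, h1, h2, pvFuel, pvLoop]
    have hB : solution_alt cap n ds ps = 0 := by
      unfold solution_alt
      exact pvBLoop_zeros cap ds ps hzd hzp _
    rw [hA, hB]
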